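-- pv_equiv track=rewrite | github.com/hwkxhh/refine-x | refine-x/backend/app/services/medical_rules.py | detect_multiple_diagnoses
-- ===== SOURCE A (Python) =====
-- from typing import Any, Dict, List, Optional, Tuple, Set
--
-- def detect_multiple_diagnoses(text: str) -> List[str]:
--     """Detect if multiple diagnoses are present in one cell."""
--     if not text or not isinstance(text, str):
--         return []
--
--     # Common separators for multiple diagnoses
--     separators = [',', ';', '/', '&', ' and ', '\n']
--
--     # Split by separators
--     parts = [text]
--     for sep in separators:
--         new_parts = []
--         for part in parts:
--             new_parts.extend(part.split(sep))
--         parts = new_parts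
--
--     # Clean and filter
--     diagnoses = []
--     for part in parts:
--         clean = part.strip()
--         if clean and len(clean) > 1:  # Ignore single characters
--             diagnoses.append(clean)
--
--     return diagnoses if len(diagnoses) > 1 else []
-- ===== SOURCE B (Python) =====
-- def detect_multiple_diagnoses(text):
--     """Detect if multiple diagnoses are present in one cell.
--
--     Single left-to-right scan: instead of six successive whole-list splitting
--     passes, walk the text once, cutting a token at every separator occurrence
--     (',', ';', '/', '&', ' and ', '\n'), then clean in one comprehension.
--     """
--     if not text or not isinstance(text, str):
--         return []
--     tokens = []
--     buf = []
--     i = 0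
--     n = len(text)
--     while i < n:
--         c = text[i]
--         if c in ",;/&\n":
--             tokens.append("".join(buf))
--             buf = []
--             i += 1
--         elif text.startswith(" and ", i):
--             tokens.append("".join(buf))
--             buf = []
--             i += 5
--         else:
--             buf.append(c)
--             i += 1
--     tokens.append("".join(buf))
--     diagnoses = [t for t in (tok.strip() for tok in tokens) if len(t) > 1]
--     return diagnoses if len(diagnoses) > 1 else []
-- ===== Notes on version B (the rewrite author's own statement) =====
-- stated objective: alternative
-- what changed: A splits the whole parts list once per separator (six successive splitting passes, then a cleaning pass); B tokenizes in a single left-to-right scan of the text, cutting a token at each separator occurrence (',', ';', '/', '&', ' and ', '\n'), then cleans the tokens in one comprehension.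
import Mathlib
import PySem

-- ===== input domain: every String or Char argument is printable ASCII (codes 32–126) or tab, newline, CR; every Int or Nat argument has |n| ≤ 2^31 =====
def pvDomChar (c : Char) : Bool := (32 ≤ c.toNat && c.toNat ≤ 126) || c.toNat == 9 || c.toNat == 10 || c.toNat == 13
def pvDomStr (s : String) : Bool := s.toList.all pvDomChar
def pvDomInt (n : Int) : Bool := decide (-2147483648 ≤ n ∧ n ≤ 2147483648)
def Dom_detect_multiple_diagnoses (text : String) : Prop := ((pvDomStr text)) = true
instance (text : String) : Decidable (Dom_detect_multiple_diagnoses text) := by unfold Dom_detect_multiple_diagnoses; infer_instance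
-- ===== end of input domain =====

-- B replaces A's six successive whole-list splitting passes (one per separator) by a single
-- left-to-right scan that cuts a token at each separator occurrence; objective: alternative decomposition.


-- ===== PORT A =====
-- ' and ' as a char list (shared by both ports)
def pvAndSep : List Char := [' ', 'a', 'n', 'd', ' ']

-- separators = [',', ';', '/', '&', ' and ', '\n']
def pvSepsA : List (List Char) := [[','], [';'], ['/'], ['&'], pvAndSep, ['\n']]

def detect_multiple_diagnoses (text : String) : List String :=
  -- if not text: return []
  if text.toList = [] then []
  else
    -- parts = [text]; for sep in separators: new_parts = []; for part in parts: new_parts.extend(part.split(sep)); parts = new_parts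
    let parts := pvSepsA.foldl
      (fun parts sep => parts.foldl (fun new_parts part => new_parts ++ PySem.Chars.splitOn part sep) [])
      [text.toList]
    -- diagnoses = []; for part in parts: clean = part.strip(); if clean and len(clean) > 1: diagnoses.append(clean)
    let diagnoses := parts.foldl
      (fun diagnoses part =>
        let clean := PySem.Chars.strip part
        if clean ≠ [] ∧ 1 < clean.length then diagnoses ++ [clean] else diagnoses)
      []
    -- return diagnoses if len(diagnoses) > 1 else []
    if 1 < diagnoses.length then diagnoses.map String.ofList else []

-- ===== PORT B =====
def pvIsSep (c : Char) : Bool := [',', ';', '/', '&', '\n'].contains c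

-- Source B's while loop: buf holds the current token (reversed); a separator occurrence cuts a token
def pvScan (l : List Char) (buf : List Char) : List (List Char) :=
  match l with
  | [] => [buf.reverse]
  | c :: rest =>
    if pvIsSep c then buf.reverse :: pvScan rest []
    else if PySem.Chars.startswith (c :: rest) pvAndSep then
      buf.reverse :: pvScan ((c :: rest).drop 5) []
    else pvScan rest (c :: buf)
termination_by l.length
decreasing_by
  all_goals simp [List.length_drop]


def detect_multiple_diagnoses_alt (text : String) : List String :=
  if text.toList = [] then []
  else
    let tokens := pvScan text.toList []
    -- diagnoses = [t for t in (tok.strip() for tok in tokens) if len(t) > 1]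
    let diagnoses := (tokens.map PySem.Chars.strip).filter (fun t => 1 < t.length)
    if 1 < diagnoses.length then diagnoses.map String.ofList else []

-- ===== PRECONDITION & SPEC =====
def Spec_detect_multiple_diagnoses (text : String) (out : List String) : Prop := out = detect_multiple_diagnoses_alt text
instance (text : String) (out : List String) : Decidable (Spec_detect_multiple_diagnoses text out) := by unfold Spec_detect_multiple_diagnoses; infer_instance

-- ===== CLAIM (what is proved, stated in full; the proofs are below) =====
def Claim_equal_detect_multiple_diagnoses : Prop := ∀ (text : String), Dom_detect_multiple_diagnoses text → Spec_detect_multiple_diagnoses text (detect_multiple_diagnoses text)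

-- ===== LEMMAS AND PROOFS =====


def pvConsHead (p : List Char) : List (List Char) → List (List Char)
  | [] => [p]
  | h :: t => (p ++ h) :: t

theorem pvConsHead_assoc (p q : List Char) (X : List (List Char)) :
    pvConsHead p (pvConsHead q X) = pvConsHead (p ++ q) X := by
  cases X <;> simp [pvConsHead]

theorem pvConsHead_nil (X : List (List Char)) (hX : X ≠ []) : pvConsHead [] X = X := by
  cases X with
  | nil => exact absurd rfl hX
  | cons h t => simp [pvConsHead]

theorem pv_go_ne_nil (sep : List Char) (fuel : Nat) (l cur : List Char) (acc : List (List Char)) :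
    PySem.Chars.splitOn.go sep fuel l cur acc ≠ [] := by
  induction fuel using Nat.strong_induction_on generalizing l cur acc with
  | _ fuel ih =>
    match fuel, l with
    | 0, l => simp [PySem.Chars.splitOn.go]
    | fuel+1, [] => simp [PySem.Chars.splitOn.go]
    | fuel+1, c :: rest =>
      rw [PySem.Chars.splitOn.go]
      split
      · exact ih fuel (by omega) _ _ _
      · exact ih fuel (by omega) _ _ _

theorem pv_splitOn_ne_nil (l sep : List Char) : PySem.Chars.splitOn l sep ≠ [] := by
  unfold PySem.Chars.splitOn; exact pv_go_ne_nil _ _ _ _ _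

theorem pv_go_spec (sep : List Char) (hsep : sep ≠ []) (fuel : Nat) :
    ∀ (l cur : List Char) (acc : List (List Char)), l.length < fuel →
      PySem.Chars.splitOn.go sep fuel l cur acc
        = acc.reverse ++ pvConsHead cur.reverse (PySem.Chars.splitOn l sep) := by
  induction fuel using Nat.strong_induction_on with
  | _ fuel ih =>
    intro l cur acc hlen
    cases fuel with
    | zero => simp at hlen
    | succ fuel =>
      cases l with
      | nil =>
        rw [PySem.Chars.splitOn.go]
        · simp [PySem.Chars.splitOn, PySem.Chars.splitOn.go, pvConsHead]
        · omega
      | cons c rest =>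
        have hlsep : 1 ≤ sep.length := by
          cases sep with
          | nil => exact absurd rfl hsep
          | cons a b => simp
        have hrlen : rest.length < fuel := by simp at hlen; omega
        rw [PySem.Chars.splitOn.go]
        split
        case isTrue hpre =>
          rw [ih fuel (by omega) _ _ _ (by simp [List.length_drop]; omega : (List.drop sep.length (c :: rest)).length < fuel)]
          conv_rhs => rw [PySem.Chars.splitOn, PySem.Chars.splitOn.go]
          rw [if_pos hpre]
          rw [ih ((c :: rest).length) (by simp; omega) _ _ _ (by simp [List.length_drop]; omega)]
          cases hX : PySem.Chars.splitOn (List.drop sep.length (c :: rest)) sep with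
          | nil => exact absurd hX (pv_splitOn_ne_nil _ _)
          | cons h t => simp [pvConsHead]
        case isFalse hpre =>
          rw [ih fuel (by omega) _ _ _ hrlen]
          conv_rhs => rw [PySem.Chars.splitOn, PySem.Chars.splitOn.go]
          rw [if_neg hpre]
          rw [ih ((c :: rest).length) (by simp; omega) _ _ _ (by simp)]
          simp only [List.reverse_cons, List.reverse_nil, List.nil_append,
            pvConsHead_assoc]

theorem pv_splitOn_prefix (sep : List Char) (hsep : sep ≠ []) (c : Char) (rest : List Char)
    (h : sep.isPrefixOf (c :: rest) = true) :
    PySem.Chars.splitOn (c :: rest) sep = [] :: PySem.Chars.splitOn ((c :: rest).drop sep.length) sep := by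
  have hlsep : 1 ≤ sep.length := by
    cases sep with
    | nil => exact absurd rfl hsep
    | cons a b => simp
  rw [PySem.Chars.splitOn, PySem.Chars.splitOn.go, if_pos h]
  rw [pv_go_spec sep hsep _ _ _ _ (by simp [List.length_drop]; omega)]
  simp only [List.reverse_nil]
  rw [pvConsHead_nil _ (pv_splitOn_ne_nil _ _)]
  simp

theorem pv_splitOn_cons (sep : List Char) (hsep : sep ≠ []) (c : Char) (rest : List Char)
    (h : sep.isPrefixOf (c :: rest) = false) :
    PySem.Chars.splitOn (c :: rest) sep = pvConsHead [c] (PySem.Chars.splitOn rest sep) := by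
  rw [PySem.Chars.splitOn, PySem.Chars.splitOn.go, if_neg (by simp [h])]
  rw [pv_go_spec sep hsep _ _ _ _ (by simp)]
  simp only [List.reverse_nil, List.reverse_singleton]
  simp

theorem pv_splitOn_nil (sep : List Char) : PySem.Chars.splitOn [] sep = [[]] := by
  simp [PySem.Chars.splitOn, PySem.Chars.splitOn.go]

def pvF (s : List Char) (X : List (List Char)) : List (List Char) :=
  X.flatMap (fun p => PySem.Chars.splitOn p s)

theorem pvF_ne_nil (s : List Char) (X : List (List Char)) (hX : X ≠ []) : pvF s X ≠ [] := by
  cases X with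
  | nil => exact absurd rfl hX
  | cons h t =>
    simp only [pvF, List.flatMap_cons]
    intro he
    exact pv_splitOn_ne_nil h s (List.append_eq_nil_iff.mp he).1

theorem pvConsHead_append (p : List Char) (A B : List (List Char)) (hA : A ≠ []) :
    pvConsHead p (A ++ B) = pvConsHead p A ++ B := by
  cases A with
  | nil => exact absurd rfl hA
  | cons h t => simp [pvConsHead]

theorem pvF_nilhead (s : List Char) (X : List (List Char)) :
    pvF s ([] :: X) = [] :: pvF s X := by
  simp [pvF, pv_splitOn_nil]

theorem pvF_commute (s : List Char) (hs : s ≠ []) (c : Char) (q : List Char) (qs : List (List Char))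
    (h : s.isPrefixOf (c :: q) = false) :
    pvF s (pvConsHead [c] (q :: qs)) = pvConsHead [c] (pvF s (q :: qs)) := by
  have h1 : pvConsHead [c] (q :: qs) = (c :: q) :: qs := rfl
  rw [h1, pvF, pvF, List.flatMap_cons, List.flatMap_cons,
    pv_splitOn_cons s hs c q h, pvConsHead_append _ _ _ (pv_splitOn_ne_nil q s)]

theorem pvF_hit (s : List Char) (hs : s ≠ []) (q : List Char) (qs : List (List Char)) :
    pvF s (pvConsHead s (q :: qs)) = [] :: pvF s (q :: qs) := by
  cases s with
  | nil => exact absurd rfl hs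
  | cons a s' =>
    have h1 : pvConsHead (a :: s') (q :: qs) = (a :: (s' ++ q)) :: qs := rfl
    rw [h1, pvF, pvF, List.flatMap_cons, List.flatMap_cons]
    have hpre : (a :: s').isPrefixOf (a :: (s' ++ q)) = true := by
      rw [List.isPrefixOf_iff_prefix]
      exact ⟨q, by simp⟩
    rw [pv_splitOn_prefix (a :: s') hs a (s' ++ q) hpre]
    have hdrop : (a :: (s' ++ q)).drop (a :: s').length = q := by
      have : a :: (s' ++ q) = (a :: s') ++ q := by simp
      rw [this, List.drop_left]
    rw [hdrop]
    simp

def pvC4 (t : List Char) : List (List Char) :=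
  pvF ['&'] (pvF ['/'] (pvF [';'] (PySem.Chars.splitOn t [','])))

def pvH (t : List Char) : List (List Char) := pvF ['\n'] (pvF pvAndSep (pvC4 t))

theorem pvC4_ne_nil (t : List Char) : pvC4 t ≠ [] := by
  unfold pvC4
  exact pvF_ne_nil _ _ (pvF_ne_nil _ _ (pvF_ne_nil _ _ (pv_splitOn_ne_nil _ _)))

theorem pv_single_hit (d : Char) (t : List Char) :
    PySem.Chars.splitOn (d :: t) [d] = [] :: PySem.Chars.splitOn t [d] := by
  have := pv_splitOn_prefix [d] (by simp) d t (by simp [List.isPrefixOf])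
  simpa using this

theorem pv_single_miss (c d : Char) (t : List Char) (hcd : ¬ c = d) :
    PySem.Chars.splitOn (c :: t) [d] = pvConsHead [c] (PySem.Chars.splitOn t [d]) := by
  refine pv_splitOn_cons [d] (by simp) c t ?_
  simp [List.isPrefixOf]
  exact fun h => absurd h.symm hcd

theorem pvC4_nil : pvC4 [] = [[]] := by decide

theorem pvC4_sep (c : Char) (t : List Char) (h : c = ',' ∨ c = ';' ∨ c = '/' ∨ c = '&') :
    pvC4 (c :: t) = [] :: pvC4 t := by
  unfold pvC4
  rcases h with h | h | h | h <;> subst h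
  · rw [pv_single_hit, pvF_nilhead, pvF_nilhead, pvF_nilhead]
  · rw [pv_single_miss _ _ _ (by decide)]
    obtain ⟨q, qs, hq⟩ : ∃ q qs, PySem.Chars.splitOn t [','] = q :: qs := by
      cases hX : PySem.Chars.splitOn t [','] with
      | nil => exact absurd hX (pv_splitOn_ne_nil _ _)
      | cons q qs => exact ⟨q, qs, rfl⟩
    rw [hq]
    rw [pvF_hit [';'] (by simp) q qs, pvF_nilhead, pvF_nilhead]
  · rw [pv_single_miss _ _ _ (by decide)]
    obtain ⟨q, qs, hq⟩ : ∃ q qs, PySem.Chars.splitOn t [','] = q :: qs := by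
      cases hX : PySem.Chars.splitOn t [','] with
      | nil => exact absurd hX (pv_splitOn_ne_nil _ _)
      | cons q qs => exact ⟨q, qs, rfl⟩
    rw [hq, pvF_commute [';'] (by simp) _ _ _ (by simp [List.isPrefixOf])]
    obtain ⟨q2, qs2, hq2⟩ : ∃ q2 qs2, pvF [';'] (q :: qs) = q2 :: qs2 := by
      cases hX : pvF [';'] (q :: qs) with
      | nil => exact absurd hX (pvF_ne_nil _ _ (by simp))
      | cons q2 qs2 => exact ⟨q2, qs2, rfl⟩
    rw [hq2, pvF_hit ['/'] (by simp) q2 qs2, pvF_nilhead]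
  · rw [pv_single_miss _ _ _ (by decide)]
    obtain ⟨q, qs, hq⟩ : ∃ q qs, PySem.Chars.splitOn t [','] = q :: qs := by
      cases hX : PySem.Chars.splitOn t [','] with
      | nil => exact absurd hX (pv_splitOn_ne_nil _ _)
      | cons q qs => exact ⟨q, qs, rfl⟩
    rw [hq, pvF_commute [';'] (by simp) _ _ _ (by simp [List.isPrefixOf])]
    obtain ⟨q2, qs2, hq2⟩ : ∃ q2 qs2, pvF [';'] (q :: qs) = q2 :: qs2 := by
      cases hX : pvF [';'] (q :: qs) with
      | nil => exact absurd hX (pvF_ne_nil _ _ (by simp))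
      | cons q2 qs2 => exact ⟨q2, qs2, rfl⟩
    rw [hq2, pvF_commute ['/'] (by simp) _ _ _ (by simp [List.isPrefixOf])]
    obtain ⟨q3, qs3, hq3⟩ : ∃ q3 qs3, pvF ['/'] (q2 :: qs2) = q3 :: qs3 := by
      cases hX : pvF ['/'] (q2 :: qs2) with
      | nil => exact absurd hX (pvF_ne_nil _ _ (by simp))
      | cons q3 qs3 => exact ⟨q3, qs3, rfl⟩
    rw [hq3, pvF_hit ['&'] (by simp) q3 qs3]

theorem pv_single_nopre (c d : Char) (q : List Char) (h : ¬ c = d) :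
    List.isPrefixOf [d] (c :: q) = false := by
  simp [List.isPrefixOf]
  exact fun hh => absurd hh.symm h

theorem pvC4_plain (c : Char) (t : List Char) (h : ¬ (c = ',' ∨ c = ';' ∨ c = '/' ∨ c = '&')) :
    pvC4 (c :: t) = pvConsHead [c] (pvC4 t) := by
  simp only [not_or] at h
  obtain ⟨h1, h2, h3, h4⟩ := h
  unfold pvC4
  rw [pv_single_miss _ _ _ h1]
  obtain ⟨q, qs, hq⟩ : ∃ q qs, PySem.Chars.splitOn t [','] = q :: qs := by
    cases hX : PySem.Chars.splitOn t [','] with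
    | nil => exact absurd hX (pv_splitOn_ne_nil _ _)
    | cons q qs => exact ⟨q, qs, rfl⟩
  rw [hq, pvF_commute [';'] (by simp) _ _ _ (pv_single_nopre _ _ _ h2)]
  obtain ⟨q2, qs2, hq2⟩ : ∃ q2 qs2, pvF [';'] (q :: qs) = q2 :: qs2 := by
    cases hX : pvF [';'] (q :: qs) with
    | nil => exact absurd hX (pvF_ne_nil _ _ (by simp))
    | cons q2 qs2 => exact ⟨q2, qs2, rfl⟩
  rw [hq2, pvF_commute ['/'] (by simp) _ _ _ (pv_single_nopre _ _ _ h3)]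
  obtain ⟨q3, qs3, hq3⟩ : ∃ q3 qs3, pvF ['/'] (q2 :: qs2) = q3 :: qs3 := by
    cases hX : pvF ['/'] (q2 :: qs2) with
    | nil => exact absurd hX (pvF_ne_nil _ _ (by simp))
    | cons q3 qs3 => exact ⟨q3, qs3, rfl⟩
  rw [hq3, pvF_commute ['&'] (by simp) _ _ _ (pv_single_nopre _ _ _ h4)]

theorem pvC4_head_prefix : ∀ (t : List Char) (q : List Char) (qs : List (List Char)),
    pvC4 t = q :: qs → q <+: t := by
  intro t
  induction t with
  | nil =>
    intro q qs h
    rw [pvC4_nil] at h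
    cases h
    exact List.nil_prefix
  | cons c t ih =>
    intro q qs h
    by_cases hc : c = ',' ∨ c = ';' ∨ c = '/' ∨ c = '&'
    · rw [pvC4_sep c t hc] at h
      cases h
      exact List.nil_prefix
    · rw [pvC4_plain c t hc] at h
      obtain ⟨q', qs', hq'⟩ : ∃ q' qs', pvC4 t = q' :: qs' := by
        cases hX : pvC4 t with
        | nil => exact absurd hX (pvC4_ne_nil _)
        | cons a b => exact ⟨a, b, rfl⟩
      rw [hq'] at h
      simp only [pvConsHead, List.singleton_append] at h
      cases h
      exact (List.cons_prefix_cons).mpr ⟨rfl, ih _ _ hq'⟩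

theorem pvH_nil : pvH [] = [[]] := by decide

theorem pvH_sep (c : Char) (t : List Char) (h : pvIsSep c = true) : pvH (c :: t) = [] :: pvH t := by
  have h5 : c = ',' ∨ c = ';' ∨ c = '/' ∨ c = '&' ∨ c = '\n' := by
    simpa [pvIsSep] using h
  unfold pvH
  by_cases h4 : c = ',' ∨ c = ';' ∨ c = '/' ∨ c = '&'
  · rw [pvC4_sep c t h4, pvF_nilhead, pvF_nilhead]
  · have hnl : c = '\n' := by tauto
    subst hnl
    rw [pvC4_plain _ t (by decide)]
    obtain ⟨q, qs, hq⟩ : ∃ q qs, pvC4 t = q :: qs := by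
      cases hX : pvC4 t with
      | nil => exact absurd hX (pvC4_ne_nil _)
      | cons a b => exact ⟨a, b, rfl⟩
    rw [hq, pvF_commute pvAndSep (by decide) _ _ _ (by simp [pvAndSep, List.isPrefixOf])]
    obtain ⟨q2, qs2, hq2⟩ : ∃ q2 qs2, pvF pvAndSep (q :: qs) = q2 :: qs2 := by
      cases hX : pvF pvAndSep (q :: qs) with
      | nil => exact absurd hX (pvF_ne_nil _ _ (by simp))
      | cons a b => exact ⟨a, b, rfl⟩
    rw [hq2, pvF_hit ['\n'] (by simp) q2 qs2]

theorem pvH_and (u : List Char) : pvH (pvAndSep ++ u) = [] :: pvH u := by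
  unfold pvH
  have hC4 : pvC4 (pvAndSep ++ u) = pvConsHead pvAndSep (pvC4 u) := by
    show pvC4 (' ' :: 'a' :: 'n' :: 'd' :: ' ' :: u) = _
    rw [pvC4_plain ' ' _ (by decide), pvC4_plain 'a' _ (by decide), pvC4_plain 'n' _ (by decide),
      pvC4_plain 'd' _ (by decide), pvC4_plain ' ' _ (by decide)]
    simp only [pvConsHead_assoc]
    rfl
  rw [hC4]
  obtain ⟨q, qs, hq⟩ : ∃ q qs, pvC4 u = q :: qs := by
    cases hX : pvC4 u with
    | nil => exact absurd hX (pvC4_ne_nil _)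
    | cons a b => exact ⟨a, b, rfl⟩
  rw [hq, pvF_hit pvAndSep (by decide) q qs, pvF_nilhead]

theorem pvH_plain (c : Char) (t : List Char) (h1 : pvIsSep c = false)
    (h2 : ¬ pvAndSep <+: (c :: t)) :
    pvH (c :: t) = pvConsHead [c] (pvH t) := by
  have hc : ¬ (c = ',' ∨ c = ';' ∨ c = '/' ∨ c = '&') := by
    simp [pvIsSep] at h1
    tauto
  have hnl : ¬ c = '\n' := by
    simp [pvIsSep] at h1
    tauto
  unfold pvH
  rw [pvC4_plain c t hc]
  obtain ⟨q, qs, hq⟩ : ∃ q qs, pvC4 t = q :: qs := by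
    cases hX : pvC4 t with
    | nil => exact absurd hX (pvC4_ne_nil _)
    | cons a b => exact ⟨a, b, rfl⟩
  have hqpre : q <+: t := pvC4_head_prefix t q qs hq
  have hno : pvAndSep.isPrefixOf (c :: q) = false := by
    rw [Bool.eq_false_iff]
    intro hp
    rw [List.isPrefixOf_iff_prefix] at hp
    exact h2 (hp.trans ((List.cons_prefix_cons).mpr ⟨rfl, hqpre⟩))
  rw [hq, pvF_commute pvAndSep (by decide) _ _ _ hno]
  obtain ⟨q2, qs2, hq2⟩ : ∃ q2 qs2, pvF pvAndSep (q :: qs) = q2 :: qs2 := by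
    cases hX : pvF pvAndSep (q :: qs) with
    | nil => exact absurd hX (pvF_ne_nil _ _ (by simp))
    | cons a b => exact ⟨a, b, rfl⟩
  rw [hq2, pvF_commute ['\n'] (by simp) _ _ _ (pv_single_nopre _ _ _ hnl)]

theorem pvScan_buf : ∀ (n : Nat) (t : List Char), t.length ≤ n → ∀ (buf : List Char),
    pvScan t buf = pvConsHead buf.reverse (pvScan t []) := by
  intro n
  induction n with
  | zero =>
    intro t ht buf
    have : t = [] := List.length_eq_zero_iff.mp (Nat.le_zero.mp ht)
    subst this
    simp [pvScan, pvConsHead]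
  | succ n ih =>
    intro t ht buf
    cases t with
    | nil => simp [pvScan, pvConsHead]
    | cons c rest =>
      rw [pvScan, pvScan]
      by_cases hsep : pvIsSep c
      · simp only [hsep, if_true, pvConsHead, List.reverse_nil, List.append_nil]
      · simp only [hsep, if_false, Bool.false_eq_true]
        by_cases hand : PySem.Chars.startswith (c :: rest) pvAndSep
        · simp only [hand, if_true, pvConsHead, List.reverse_nil, List.append_nil]
        · simp only [hand, if_false, Bool.false_eq_true]
          have hr : rest.length ≤ n := by simp at ht; omega
          rw [ih rest hr (c :: buf), ih rest hr [c], pvConsHead_assoc]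
          simp

theorem pvH_eq_pvScan_aux : ∀ (n : Nat) (t : List Char), t.length ≤ n → pvH t = pvScan t [] := by
  intro n
  induction n with
  | zero =>
    intro t ht
    have : t = [] := List.length_eq_zero_iff.mp (Nat.le_zero.mp ht)
    subst this
    rw [pvH_nil]
    simp [pvScan]
  | succ n ih =>
    intro t ht
    cases t with
    | nil => rw [pvH_nil]; simp [pvScan]
    | cons c rest =>
      have hr : rest.length ≤ n := by simp at ht; omega
      rw [pvScan]
      by_cases hsep : pvIsSep c
      · simp only [hsep, if_true, List.reverse_nil]
        rw [pvH_sep c rest hsep, ih rest hr]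
      · simp only [hsep, if_false, Bool.false_eq_true]
        by_cases hand : PySem.Chars.startswith (c :: rest) pvAndSep
        · simp only [hand, if_true, List.reverse_nil]
          obtain ⟨u, hu⟩ := (PySem.Chars.startswith_iff _ _).mp hand
          rw [← hu]
          have hdrop : (pvAndSep ++ u).drop 5 = u := by
            rw [show (5 : Nat) = pvAndSep.length from rfl, List.drop_left]
          rw [hdrop, pvH_and u, ih u (by rw [← hu] at ht; simp [pvAndSep] at ht; omega)]
        · simp only [hand, if_false, Bool.false_eq_true]
          have hnp : ¬ pvAndSep <+: (c :: rest) := by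
            intro hp
            rw [← PySem.Chars.startswith_iff] at hp
            exact absurd hp hand
          rw [pvH_plain c rest (Bool.eq_false_iff.mpr hsep) hnp, ih rest hr,
            pvScan_buf rest.length rest (le_refl _) [c]]
          rfl

theorem pvH_eq_pvScan (t : List Char) : pvH t = pvScan t [] :=
  pvH_eq_pvScan_aux t.length t (le_refl _)

theorem pv_parts_eq (t : List Char) :
    pvSepsA.foldl
      (fun parts sep => parts.foldl (fun new_parts part => new_parts ++ PySem.Chars.splitOn part sep) [])
      [t] = pvH t := by
  simp only [pvSepsA, List.foldl_cons, List.foldl_nil, PySem.List.foldl_append_eq_flatMap,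
    List.nil_append, pvH, pvC4, pvF, List.flatMap_cons, List.flatMap_nil, List.append_nil]

theorem pv_clean_aux : ∀ (parts : List (List Char)) (acc : List (List Char)),
    parts.foldl
      (fun diagnoses part =>
        let clean := PySem.Chars.strip part
        if clean ≠ [] ∧ 1 < clean.length then diagnoses ++ [clean] else diagnoses)
      acc
      = acc ++ (parts.map PySem.Chars.strip).filter (fun t => 1 < t.length) := by
  intro parts
  induction parts with
  | nil => simp
  | cons p ps ih =>
    intro acc
    simp only [List.foldl_cons, List.map_cons, List.filter_cons]
    by_cases h : 1 < (PySem.Chars.strip p).length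
    · have hne : PySem.Chars.strip p ≠ [] := by
        intro he
        rw [he] at h
        simp at h
      rw [if_pos ⟨hne, h⟩, ih]
      simp [h]
    · rw [if_neg (by tauto), ih]
      simp [h]

theorem pv_clean_eq (parts : List (List Char)) :
    parts.foldl
      (fun diagnoses part =>
        let clean := PySem.Chars.strip part
        if clean ≠ [] ∧ 1 < clean.length then diagnoses ++ [clean] else diagnoses)
      []
      = (parts.map PySem.Chars.strip).filter (fun t => 1 < t.length) := by
  rw [pv_clean_aux]
  simp

-- ===== VERDICT (by name: the statement is the Claim_ definition above) =====
theorem detect_multiple_diagnoses_spec : Claim_equal_detect_multiple_diagnoses := by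
  intro text _
  unfold Spec_detect_multiple_diagnoses detect_multiple_diagnoses detect_multiple_diagnoses_alt
  by_cases h : text.toList = []
  · simp [h]
  · simp only [if_neg h]
    rw [pv_parts_eq, pvH_eq_pvScan, pv_clean_eq]
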